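-- pv_equiv track=rewrite | github.com/sipyourdrink-ltd/bernstein | tests/unit/test_adapter_contract.py | _strip_json_payloads
-- ===== SOURCE A (Python) =====
-- def _strip_json_payloads(argv: list[str], json_flags: list[str]) -> list[str]:
--     """Return argv with each ``flag <payload>`` pair for the listed flags removed."""
--     if not json_flags:
--         return argv
--     out: list[str] = []
--     skip_next = False
--     for tok in argv:
--         if skip_next:
--             skip_next = False
--             continue
--         if tok in json_flags:
--             skip_next = True
--             continue
--         out.append(tok)
--     return out
-- ===== SOURCE B (Python) =====
-- def _strip_json_payloads(argv: list[str], json_flags: list[str]) -> list[str]: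
--     """Return argv with each ``flag <payload>`` pair for the listed flags removed."""
--     if not json_flags:
--         return argv
--     # Pass 1: build the set of argv indices to delete.
--     remove: set[int] = set()
--     i = 0
--     n = len(argv)
--     while i < n:
--         if argv[i] in json_flags:
--             remove.add(i)
--             remove.add(i + 1)
--             i += 2
--         else:
--             i += 1
--     # Pass 2: keep every token whose index survived.
--     return [tok for idx, tok in enumerate(argv) if idx not in remove]
-- ===== Notes on version B (the rewrite author's own statement) =====
-- stated objective: alternative
-- what changed: Replaces A's single stateful skip_next loop by two separate passes: an index scan that builds a set of indices to delete, then a filtering comprehension over enumerate(argv).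
import Mathlib
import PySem

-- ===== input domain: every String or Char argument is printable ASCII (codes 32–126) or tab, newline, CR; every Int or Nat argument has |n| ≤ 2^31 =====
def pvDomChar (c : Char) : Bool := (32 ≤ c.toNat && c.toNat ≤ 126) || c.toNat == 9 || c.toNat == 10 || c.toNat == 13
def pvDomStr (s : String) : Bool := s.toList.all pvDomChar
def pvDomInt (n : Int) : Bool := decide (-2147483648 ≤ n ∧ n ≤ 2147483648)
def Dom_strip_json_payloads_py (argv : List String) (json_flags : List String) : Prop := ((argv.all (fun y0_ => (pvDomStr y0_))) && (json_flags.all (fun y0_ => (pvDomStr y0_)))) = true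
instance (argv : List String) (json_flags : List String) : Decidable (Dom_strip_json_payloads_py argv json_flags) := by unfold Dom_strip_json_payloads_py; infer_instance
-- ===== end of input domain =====

-- B replaces A's single stateful skip_next loop by two passes (build an index remove-set, then filter enumerate); alternative decomposition, same cost.

-- ===== PORT A =====
-- literal transliteration of A's for-loop with state (out, skip_next)
def strip_json_payloads_py (argv : List String) (json_flags : List String) : List String :=
  if json_flags = [] then argv
  else
    (argv.foldl (fun (st : List String × Bool) tok =>
      if st.2 then (st.1, false)
      else if json_flags.contains tok then (st.1, true)
      else (st.1 ++ [tok], false)) (([] : List String), false)).1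

-- ===== PORT B =====
-- pass 1 of Source B: the while-loop building the set of indices to delete
def pvRemScan (argv : List String) (json_flags : List String) (i : Nat) (remove : PySem.Set Int) : PySem.Set Int :=
  if h : i < argv.length then
    if json_flags.contains argv[i] then
      pvRemScan argv json_flags (i + 2) (PySem.Set.add (PySem.Set.add remove (i : Int)) ((i : Int) + 1))
    else
      pvRemScan argv json_flags (i + 1) remove
  else remove
termination_by argv.length - i

def strip_json_payloads_py_alt (argv : List String) (json_flags : List String) : List String :=
  if json_flags = [] then argv
  else
    let remove := pvRemScan argv json_flags 0 PySem.Set.empty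
    -- pass 2 of Source B: the filtering comprehension over enumerate(argv)
    (PySem.List.enumerate argv).filterMap
      (fun p => if PySem.Set.contains remove p.1 then none else some p.2)

-- ===== PRECONDITION & SPEC =====
def Spec_strip_json_payloads_py (argv : List String) (json_flags : List String) (out : List String) : Prop := out = strip_json_payloads_py_alt argv json_flags
instance (argv : List String) (json_flags : List String) (out : List String) : Decidable (Spec_strip_json_payloads_py argv json_flags out) := by unfold Spec_strip_json_payloads_py; infer_instance

-- ===== CLAIM (what is proved, stated in full; the proofs are below) =====
def Claim_equal_strip_json_payloads_py : Prop := ∀ (argv : List String) (json_flags : List String), Dom_strip_json_payloads_py argv json_flags → Spec_strip_json_payloads_py argv json_flags (strip_json_payloads_py argv json_flags)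

-- ===== LEMMAS AND PROOFS =====

-- proof-side recursion equal to A's loop
def pvGo (flags : List String) : Bool → List String → List String
  | _, [] => []
  | true, _ :: r => pvGo flags false r
  | false, t :: r => if t ∈ flags then pvGo flags true r else t :: pvGo flags false r

theorem pvFoldlA (flags : List String) (l : List String) : ∀ (out : List String) (skip : Bool),
    (l.foldl (fun (st : List String × Bool) tok =>
      if st.2 then (st.1, false)
      else if tok ∈ flags then (st.1, true)
      else (st.1 ++ [tok], false)) (out, skip)).1 = out ++ pvGo flags skip l := by
  induction l with
  | nil => intro out skip; simp [pvGo.eq_def]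
  | cons t r ih =>
    intro out skip
    cases skip with
    | true => rw [List.foldl_cons]; simp only [if_pos rfl]; rw [ih]; simp [pvGo]
    | false =>
      rw [List.foldl_cons]
      by_cases h : t ∈ flags
      · simp only [Bool.false_eq_true, if_false, if_pos h]
        rw [ih]; simp [pvGo, h]
      · simp only [Bool.false_eq_true, if_false, if_neg h]
        rw [ih]; simp [pvGo, h, List.append_assoc]

-- proof-side pure version of pass 1
def pvRem' (flags : List String) : Nat → List String → List Int
  | _, [] => []
  | i, t :: rest =>
    if t ∈ flags then (i : Int) :: ((i : Int) + 1) :: pvRem' flags (i + 2) rest.tail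
    else pvRem' flags (i + 1) rest
termination_by _ l => l.length
decreasing_by all_goals (simp [List.length_tail]; try omega)

theorem pvRem'_ge (flags : List String) : ∀ (i : Nat) (l : List String) (x : Int),
    x ∈ pvRem' flags i l → (i : Int) ≤ x := by
  intro i l
  induction i, l using pvRem'.induct flags with
  | case1 i => intro x hx; simp [pvRem'] at hx
  | case2 i t rest h ih =>
    intro x hx
    simp only [pvRem', if_pos h, List.mem_cons] at hx
    rcases hx with rfl | rfl | hx
    · omega
    · omega
    · have := ih x hx; omega
  | case3 i t rest h ih =>
    intro x hx
    simp only [pvRem', if_neg h] at hx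
    have := ih x hx; omega

theorem pvContainsConsNe {a b q : Int} {S : List Int} (h1 : q ≠ a) (h2 : q ≠ b) :
    PySem.Set.contains (a :: b :: S) q = PySem.Set.contains S q := by
  simp [PySem.Set.contains, List.contains_cons, h1, h2]

theorem pvRemScan_eq (argv flags : List String) : ∀ (i : Nat) (R : List Int),
    (∀ x ∈ R, x < (i : Int)) → pvRemScan argv flags i R = R ++ pvRem' flags i (argv.drop i) := by
  intro i R
  induction i, R using pvRemScan.induct argv flags with
  | case1 i R h hc ih =>
    intro hR
    have hc' : argv[i] ∈ flags := by simpa using hc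
    have hdrop : argv.drop i = argv[i] :: argv.drop (i + 1) := List.drop_eq_getElem_cons h
    have h1 : ((i : Int)) ∉ R := fun hm => absurd (hR _ hm) (by omega)
    have h2 : ((i : Int) + 1) ∉ R ++ [(i : Int)] := by
      intro hm
      rcases List.mem_append.1 hm with hm | hm
      · exact absurd (hR _ hm) (by omega)
      · simp only [List.mem_singleton] at hm; omega
    have hadd : PySem.Set.add (PySem.Set.add R (i : Int)) ((i : Int) + 1) = R ++ [(i : Int)] ++ [(i : Int) + 1] := by
      rw [PySem.Set.add_of_not_mem h1, PySem.Set.add_of_not_mem h2]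
    rw [hadd] at ih
    rw [pvRemScan, dif_pos h, if_pos hc, hadd]
    rw [ih (by
      intro x hx
      simp only [List.mem_append, List.mem_singleton] at hx
      rcases hx with (hx | rfl) | rfl
      · have := hR _ hx; omega
      · push_cast; omega
      · push_cast; omega)]
    conv_rhs => rw [hdrop]
    simp only [pvRem', if_pos hc', List.tail_drop]
    simp [List.append_assoc]
  | case2 i R h hc ih =>
    intro hR
    have hc' : argv[i] ∉ flags := by simpa using hc
    have hdrop : argv.drop i = argv[i] :: argv.drop (i + 1) := List.drop_eq_getElem_cons h
    rw [pvRemScan, dif_pos h, if_neg hc]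
    rw [ih (by intro x hx; have := hR _ hx; omega)]
    conv_rhs => rw [hdrop]
    simp only [pvRem', if_neg hc']
  | case3 i R h =>
    intro _
    rw [pvRemScan, dif_neg h]
    rw [List.drop_eq_nil_of_le (by omega)]
    simp [pvRem']

theorem pvMain (flags : List String) : ∀ (i : Nat) (l : List String),
    (PySem.List.enumerate l (i : Int)).filterMap
      (fun p => if PySem.Set.contains (pvRem' flags i l) p.1 then none else some p.2)
      = pvGo flags false l := by
  intro i l
  induction i, l using pvRem'.induct flags with
  | case1 i => simp [pvRem', pvGo.eq_def]
  | case2 i t rest h ih =>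
    simp only [pvRem', if_pos h]
    rw [PySem.List.enumerate_cons]
    have hci : PySem.Set.contains ((i : Int) :: ((i : Int) + 1) :: pvRem' flags (i + 2) rest.tail) (i : Int) = true := by
      simp [PySem.Set.contains, List.contains_cons]
    rw [List.filterMap_cons_none (by simp [hci])]
    cases rest with
    | nil => simp [pvGo, h]
    | cons u r =>
      rw [PySem.List.enumerate_cons]
      have hci1 : PySem.Set.contains ((i : Int) :: ((i : Int) + 1) :: pvRem' flags (i + 2) (u :: r).tail) ((i : Int) + 1) = true := by
        simp [PySem.Set.contains, List.contains_cons]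
      rw [List.filterMap_cons_none (by simp [hci1])]
      simp only [List.tail_cons] at ih ⊢
      have hcong : ∀ p ∈ PySem.List.enumerate r ((i : Int) + 1 + 1),
          (if PySem.Set.contains ((i : Int) :: ((i : Int) + 1) :: pvRem' flags (i + 2) r) p.1 then (none : Option String) else some p.2)
          = (if PySem.Set.contains (pvRem' flags (i + 2) r) p.1 then none else some p.2) := by
        intro p hp
        rcases (PySem.List.mem_enumerate_iff _ _ _).1 hp with ⟨k, hk, rfl⟩
        rw [pvContainsConsNe (by push_cast; omega) (by push_cast; omega)]
      refine Eq.trans (List.filterMap_congr hcong) ?_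
      have hcast : ((i : Int) + 1 + 1) = ((i + 2 : Nat) : Int) := by push_cast; ring
      rw [hcast]
      exact ih.trans (by simp [pvGo, h])
  | case3 i t rest h ih =>
    simp only [pvRem', if_neg h]
    rw [PySem.List.enumerate_cons]
    have hnm : ((i : Int)) ∉ pvRem' flags (i + 1) rest := by
      intro hm
      have := pvRem'_ge flags (i + 1) rest _ hm
      push_cast at this; omega
    have hsome : (fun (p : Int × String) => if PySem.Set.contains (pvRem' flags (i + 1) rest) p.1 then (none : Option String) else some p.2) ((i : Int), t) = some t := by
      simp [hnm]
    refine Eq.trans (List.filterMap_cons_some hsome) ?_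
    have hcast : ((i : Int) + 1) = ((i + 1 : Nat) : Int) := by push_cast; ring
    rw [hcast]
    refine Eq.trans (congrArg (fun ys => t :: ys) ih) ?_
    simp [pvGo, h]

-- ===== VERDICT (by name: the statement is the Claim_ definition above) =====
theorem strip_json_payloads_py_spec : Claim_equal_strip_json_payloads_py := by
  intro argv flags _
  unfold Spec_strip_json_payloads_py strip_json_payloads_py strip_json_payloads_py_alt
  by_cases hf : flags = []
  · simp [hf]
  · rw [if_neg hf, if_neg hf]
    have hfun : (fun (st : List String × Bool) tok =>
        if st.2 then (st.1, false)
        else if flags.contains tok then (st.1, true)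
        else (st.1 ++ [tok], false))
      = (fun (st : List String × Bool) tok =>
        if st.2 then (st.1, false)
        else if tok ∈ flags then (st.1, true)
        else (st.1 ++ [tok], false)) := by
      funext st tok; simp
    rw [hfun, pvFoldlA, List.nil_append]
    rw [show pvRemScan argv flags 0 PySem.Set.empty = pvRem' flags 0 argv from by
      rw [pvRemScan_eq argv flags 0 PySem.Set.empty (by simp [PySem.Set.empty])]
      simp [PySem.Set.empty]]
    have := pvMain flags 0 argv
    simp only [Nat.cast_zero] at this
    rw [this]
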